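-- pv_equiv track=rewrite | github.com/HDSci/BloodMatcher-WSC24 | BSCSimulator/antigen.py | _setup_antigen_dict
-- ===== SOURCE A (Python) =====
-- DEFAULT_ANTIGEN_ORDER = ('A', 'B', 'D', 'C', 'c', 'E',
--                          'e', 'K', 'k', 'Fya', 'Fyb')
--
-- DEFAULT_VECTOR_LENGTH = 2 ** 5
--
-- def _setup_antigen_dict(antigens, antigen_order=DEFAULT_ANTIGEN_ORDER, length=DEFAULT_VECTOR_LENGTH):
--     """
--     Sets up a dictionary mapping antigens to unique power-of-two values.
--
--     Args:
--         antigens (list): A list of antigens to be included in the dictionary.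
--         antigen_order (list, optional): A list of antigens that defines the order of precedence.
--             Defaults to DEFAULT_ANTIGEN_ORDER.
--         length (int, optional): The length of the vector, which determines the highest power of two.
--             Defaults to DEFAULT_VECTOR_LENGTH.
--
--     Returns:
--         out (dict): A dictionary where keys are antigens and values are unique power-of-two integers.
--     """
--     power = int(length - 1)
--     ant_dict = dict()
--     _antigens = list(antigen_order) + antigens
--     for antigen in _antigens:
--         if antigen in ant_dict:
--             continue
--         ant_dict.update({antigen: 2 ** power})
--         power -= 1
--     return ant_dict
-- ===== SOURCE B (Python) =====
-- DEFAULT_ANTIGEN_ORDER = ('A', 'B', 'D', 'C', 'c', 'E',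
--                          'e', 'K', 'k', 'Fya', 'Fyb')
--
-- DEFAULT_VECTOR_LENGTH = 2 ** 5
--
-- def _setup_antigen_dict(antigens, antigen_order=DEFAULT_ANTIGEN_ORDER, length=DEFAULT_VECTOR_LENGTH):
--     # Sort-based ranking: a branch-free overwrite pass over the REVERSED enumeration
--     # records each key's first-occurrence index; sorting those index pairs gives the
--     # precedence ranking, from which every power of two follows by closed form.
--     combined = list(antigen_order) + antigens
--     first = {}
--     for i, k in reversed(list(enumerate(combined))):
--         first[k] = i
--     power = int(length - 1)
--     ranked = sorted(first.items(), key=lambda kv: kv[1])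
--     return {k: 2 ** (power - rank) for rank, (k, _i) in enumerate(ranked)}
-- ===== Notes on version B (the rewrite author's own statement) =====
-- stated objective: alternative
-- what changed: Sort-based ranking instead of a fused dedup loop: B records each key's first-occurrence index with a branch-free overwrite pass over the reversed enumeration, then sorts the (key, index) pairs by index and assigns 2**(power-rank) by closed form, eliminating A's membership test and mutable power counter.
-- outside the precondition, e.g. on _setup_antigen_dict(['x'], (), 0): A returns {'x': 0.5}, B returns {'x': 0.5}
import Mathlib
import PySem

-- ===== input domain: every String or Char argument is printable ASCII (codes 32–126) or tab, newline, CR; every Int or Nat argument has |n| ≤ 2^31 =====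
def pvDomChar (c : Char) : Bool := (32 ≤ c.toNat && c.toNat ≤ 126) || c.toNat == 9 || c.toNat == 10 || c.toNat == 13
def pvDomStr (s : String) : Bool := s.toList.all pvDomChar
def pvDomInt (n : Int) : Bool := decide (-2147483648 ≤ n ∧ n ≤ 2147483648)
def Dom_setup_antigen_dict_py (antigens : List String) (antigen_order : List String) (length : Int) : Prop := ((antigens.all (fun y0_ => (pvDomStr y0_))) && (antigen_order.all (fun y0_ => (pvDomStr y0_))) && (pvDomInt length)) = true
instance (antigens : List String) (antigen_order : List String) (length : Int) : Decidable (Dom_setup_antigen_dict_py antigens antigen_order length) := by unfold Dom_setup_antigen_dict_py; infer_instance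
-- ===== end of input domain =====

-- B replaces A's fused dedup-and-count loop by a different algorithm: a branch-free overwrite
-- pass over the reversed enumeration records first-occurrence indices, then sorting those index
-- pairs yields the ranking and each power of two by closed form (objective: alternative).

-- ===== PORT A =====
-- the loop 'for antigen in _antigens: if antigen in ant_dict: continue; ant_dict.update(...); power -= 1'
-- '2 ** power' is ported as '2 ^ power.toNat': exact whenever power ≥ 0, which Pre_ guarantees at every assignment
def pvLoopA (xs : List String) (d : PySem.Dict String Int) (power : Int) : PySem.Dict String Int :=
  match xs with
  | [] => d
  | x :: rest =>
    if d.contains x then pvLoopA rest d power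
    else pvLoopA rest (d.insert x ((2 : Int) ^ power.toNat)) (power - 1)

def setup_antigen_dict_py (antigens : List String) (antigen_order : List String) (length : Int) : List (String × Int) :=
  (pvLoopA (antigen_order ++ antigens) PySem.Dict.empty (length - 1)).items

-- ===== PORT B =====
-- combined = antigen_order + antigens; for i, k in reversed(list(enumerate(combined))): first[k] = i;
-- ranked = sorted(first.items(), key=lambda kv: kv[1]); {k: 2 ** (power - rank) for rank, (k, _i) in enumerate(ranked)}
-- (the comprehension's keys are distinct, so the resulting dict's items are exactly the mapped pairs;
--  '2 ** (power - rank)' is ported as '^ (…).toNat': exact whenever the exponent is ≥ 0, guaranteed by Pre_)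
def setup_antigen_dict_py_alt (antigens : List String) (antigen_order : List String) (length : Int) : List (String × Int) :=
  let combined := antigen_order ++ antigens
  let first := (PySem.List.enumerate combined).reverse.foldl
    (fun d ik => d.insert ik.2 ik.1) (PySem.Dict.empty : PySem.Dict String Int)
  let power := length - 1
  let ranked := PySem.List.sorted first.items (fun kv => kv.2) false
  (PySem.List.enumerate ranked).map (fun rk => (rk.2.1, (2 : Int) ^ (power - rk.1).toNat))

-- ===== PRECONDITION & SPEC =====
-- Pre_ excludes inputs where Python's 2 ** power is evaluated with a negative exponent (a float, not an
-- int of the declared value type): every exponent is ≥ 0 iff the number of distinct keys is ≤ length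
-- (or there are no keys at all, in which case no exponent is evaluated).
def Pre_setup_antigen_dict_py (antigens : List String) (antigen_order : List String) (length : Int) : Prop :=
  antigen_order ++ antigens = [] ∨
    ((PySem.List.dedup (antigen_order ++ antigens)).length : Int) ≤ length
instance (antigens : List String) (antigen_order : List String) (length : Int) : Decidable (Pre_setup_antigen_dict_py antigens antigen_order length) := by unfold Pre_setup_antigen_dict_py; infer_instance

def pvWitness_setup_antigen_dict_py : List String × List String × Int := (["A", "B"], ["A"], 4)

def Spec_setup_antigen_dict_py (antigens : List String) (antigen_order : List String) (length : Int) (out : List (String × Int)) : Prop := out = setup_antigen_dict_py_alt antigens antigen_order length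
instance (antigens : List String) (antigen_order : List String) (length : Int) (out : List (String × Int)) : Decidable (Spec_setup_antigen_dict_py antigens antigen_order length out) := by unfold Spec_setup_antigen_dict_py; infer_instance

-- ===== CLAIM (what is proved, stated in full; the proofs are below) =====
def Claim_equal_setup_antigen_dict_py : Prop := ∀ (antigens : List String) (antigen_order : List String) (length : Int), Dom_setup_antigen_dict_py antigens antigen_order length → Pre_setup_antigen_dict_py antigens antigen_order length → Spec_setup_antigen_dict_py antigens antigen_order length (setup_antigen_dict_py antigens antigen_order length)

-- ===== LEMMAS AND PROOFS =====

-- first-occurrence dedup of xs relative to an already-seen list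
def dedupSeen (xs : List String) (seen : List String) : List String :=
  match xs with
  | [] => []
  | x :: rest => if seen.contains x then dedupSeen rest seen else x :: dedupSeen rest (x :: seen)

-- the pair list A's loop appends for a run of fresh keys starting at exponent p
def valmap (ks : List String) (p : Int) : List (String × Int) :=
  match ks with
  | [] => []
  | k :: rest => (k, (2 : Int) ^ p.toNat) :: valmap rest (p - 1)

-- first-occurrence (key, index) pairs of an enumerated list, relative to an already-seen key list
def firstIdx (l : List (Int × String)) (seen : List String) : List (String × Int) :=
  match l with
  | [] => []
  | ik :: rest =>
    if seen.contains ik.2 then firstIdx rest seen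
    else (ik.2, ik.1) :: firstIdx rest (ik.2 :: seen)

theorem dedupSeen_congr (xs : List String) (s t : List String)
    (h : ∀ a, s.contains a = t.contains a) : dedupSeen xs s = dedupSeen xs t := by
  induction xs generalizing s t with
  | nil => rfl
  | cons x rest ih =>
    simp only [dedupSeen, h x]
    split
    · exact ih s t h
    · exact congrArg _ (ih (x :: s) (x :: t)
        (by intro a; rw [List.contains_cons, List.contains_cons, h a]))

-- ===== A side: the fused loop produces valmap of the dedup list =====

theorem loop_items (xs : List String) (d : PySem.Dict String Int) (p : Int)
    (hnd : d.keys.Nodup) :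
    (pvLoopA xs d p).items = d.items ++ valmap (dedupSeen xs d.keys) p := by
  induction xs generalizing d p with
  | nil => simp [pvLoopA, dedupSeen, valmap]
  | cons x rest ih =>
    by_cases hc : d.contains x = true
    · have hm : x ∈ d.keys := (PySem.Dict.contains_iff_mem_keys d x).1 hc
      simp [pvLoopA, hc, dedupSeen, hm, ih d p hnd]
    · have hm : x ∉ d.keys := fun h => hc ((PySem.Dict.contains_iff_mem_keys d x).2 h)
      have hc' : d.contains x = false := by simpa using hc
      rw [pvLoopA]
      rw [if_neg (by simp [hc'])]
      rw [ih (d.insert x ((2 : Int) ^ p.toNat)) (p - 1)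
            (PySem.Dict.nodup_keys_insert d x _ hnd),
          PySem.Dict.items_insert_of_not_contains _ _ hc',
          PySem.Dict.keys_insert_of_not_contains _ _ hc',
          dedupSeen_congr rest (d.keys ++ [x]) (x :: d.keys)
            (by intro a; simp [Bool.or_comm])]
      simp [dedupSeen, hm, valmap]

-- ===== B side: the overwrite pass records first-occurrence indices =====

theorem get?_foldl_insert_rev (l : List (Int × String)) (d : PySem.Dict String Int) (k : String) :
    ((l.reverse.foldl (fun d ik => d.insert ik.2 ik.1) d)).get? k =
      match l.find? (fun ik => ik.2 == k) with
      | some ik => some ik.1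
      | none => d.get? k := by
  induction l generalizing d with
  | nil => simp
  | cons x t ih =>
    rw [List.reverse_cons, List.foldl_append]
    simp only [List.foldl_cons, List.foldl_nil, List.find?]
    by_cases hx : x.2 = k
    · simp [hx, PySem.Dict.get?_insert_self]
    · rw [PySem.Dict.get?_insert_of_ne _ _ (Ne.symm hx)]
      simp only [ih]
      have : (x.2 == k) = false := by simp [hx]
      rw [this]

theorem mem_firstIdx (l : List (Int × String)) (seen : List String) (k : String) (i : Int) :
    (k, i) ∈ firstIdx l seen ↔
      k ∉ seen ∧ l.find? (fun ik => ik.2 == k) = some (i, k) := by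
  induction l generalizing seen with
  | nil => simp [firstIdx]
  | cons x t ih =>
    obtain ⟨xi, xk⟩ := x
    by_cases hx : xk = k
    · subst hx
      by_cases hm : xk ∈ seen
      · simp [firstIdx, hm, List.find?, ih]
      · simp only [firstIdx]
        rw [if_neg (by simpa using hm)]
        simp only [List.mem_cons, ih, List.find?, beq_self_eq_true]
        constructor
        · rintro (h | ⟨h1, _⟩)
          · obtain ⟨h1, h2⟩ := Prod.mk.injEq .. ▸ h
            exact ⟨hm, by rw [h2]⟩
          · exact absurd (Or.inl trivial) h1
        · rintro ⟨_, h2⟩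
          obtain ⟨h1, _⟩ := Prod.mk.injEq .. ▸ (Option.some.injEq .. ▸ h2)
          exact Or.inl (by rw [h1])
    · have hb : (xk == k) = false := by simp [hx]
      by_cases hm : xk ∈ seen
      · simp only [firstIdx]
        rw [if_pos (by simpa using hm)]
        simp only [ih, List.find?, hb]
      · simp only [firstIdx]
        rw [if_neg (by simpa using hm)]
        simp only [List.mem_cons, ih, List.find?, hb, List.mem_cons]
        constructor
        · rintro (h | ⟨h1, h2⟩)
          · obtain ⟨h1, _⟩ := Prod.mk.injEq .. ▸ h
            exact absurd h1.symm hx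
          · exact ⟨fun hin => h1 (Or.inr hin), h2⟩
        · rintro ⟨h1, h2⟩
          exact Or.inr ⟨by rintro (e | e); exact hx e.symm; exact h1 e, h2⟩

theorem map_fst_firstIdx (xs : List String) (s : Int) (seen : List String) :
    (firstIdx (PySem.List.enumerate xs s) seen).map Prod.fst = dedupSeen xs seen := by
  induction xs generalizing s seen with
  | nil => simp [PySem.List.enumerate_nil, firstIdx, dedupSeen]
  | cons x t ih =>
    rw [PySem.List.enumerate_cons]
    simp only [firstIdx, dedupSeen]
    split
    · exact ih _ _
    · simp only [List.map_cons]
      exact congrArg _ (ih _ _)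

theorem firstIdx_snd_lb (xs : List String) (s : Int) (seen : List String) :
    ∀ p ∈ firstIdx (PySem.List.enumerate xs s) seen, s ≤ p.2 := by
  induction xs generalizing s seen with
  | nil => simp [PySem.List.enumerate_nil, firstIdx]
  | cons x t ih =>
    rw [PySem.List.enumerate_cons]
    simp only [firstIdx]
    split
    · intro p hp
      have := ih (s + 1) seen p hp
      omega
    · intro p hp
      rcases List.mem_cons.mp hp with h | h
      · subst h; simp
      · have := ih (s + 1) (x :: seen) p h
        omega

theorem firstIdx_pairwise (xs : List String) (s : Int) (seen : List String) :
    (firstIdx (PySem.List.enumerate xs s) seen).Pairwise (fun a b => a.2 < b.2) := by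
  induction xs generalizing s seen with
  | nil => simp [PySem.List.enumerate_nil, firstIdx]
  | cons x t ih =>
    rw [PySem.List.enumerate_cons]
    simp only [firstIdx]
    split
    · exact ih _ _
    · refine List.pairwise_cons.mpr ⟨?_, ih _ _⟩
      intro p hp
      have := firstIdx_snd_lb t (s + 1) (x :: seen) p hp
      simpa using by omega

theorem firstIdx_nodup (xs : List String) (s : Int) (seen : List String) :
    (firstIdx (PySem.List.enumerate xs s) seen).Nodup :=
  (firstIdx_pairwise xs s seen).imp (fun h => by intro e; subst e; exact lt_irrefl _ h)

-- the overwrite dict's items are a permutation of the first-occurrence index pairs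
theorem items_perm_firstIdx (combined : List String) :
    ((((PySem.List.enumerate combined).reverse.foldl
        (fun d ik => d.insert ik.2 ik.1) (PySem.Dict.empty : PySem.Dict String Int))).items).Perm
      (firstIdx (PySem.List.enumerate combined) []) := by
  have hnd : (((PySem.List.enumerate combined).reverse.foldl
      (fun d ik => d.insert ik.2 ik.1) (PySem.Dict.empty : PySem.Dict String Int))).keys.Nodup :=
    PySem.Dict.nodup_keys_foldl_insert_key
      ((PySem.List.enumerate combined).reverse) (fun ik => ik.2) (fun _ ik => ik.1)
      (PySem.Dict.empty : PySem.Dict String Int) PySem.Dict.nodup_keys_empty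
  have hitems_nd : (((PySem.List.enumerate combined).reverse.foldl
      (fun d ik => d.insert ik.2 ik.1) (PySem.Dict.empty : PySem.Dict String Int))).items.Nodup := by
    refine List.Nodup.of_map Prod.fst ?_
    simpa [PySem.Dict.keys] using hnd
  refine (List.perm_ext_iff_of_nodup hitems_nd (firstIdx_nodup combined 0 [])).mpr ?_
  rintro ⟨k, i⟩
  rw [mem_firstIdx]
  rw [← PySem.Dict.get?_eq_some_iff_mem_items _ k i hnd]
  rw [get?_foldl_insert_rev]
  constructor
  · intro h
    cases hf : List.find? (fun ik => ik.2 == k) (PySem.List.enumerate combined) with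
    | none => rw [hf] at h; simp [PySem.Dict.get?_empty] at h
    | some ik =>
      rw [hf] at h
      have hk : ik.2 = k := by simpa using List.find?_some hf
      have hi : ik.1 = i := by simpa using h
      exact ⟨List.not_mem_nil, congrArg some (Prod.ext hi hk)⟩
  · rintro ⟨_, hf⟩
    rw [hf]

-- sorting the index pairs by index recovers first-occurrence order
theorem sorted_items_eq_firstIdx (combined : List String) :
    PySem.List.sorted
      ((((PySem.List.enumerate combined).reverse.foldl
        (fun d ik => d.insert ik.2 ik.1) (PySem.Dict.empty : PySem.Dict String Int))).items)
      (fun kv => kv.2) false = firstIdx (PySem.List.enumerate combined) [] :=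
  PySem.List.sorted_eq_of_perm_of_pairwise_lt _ _ (fun kv => kv.2)
    (items_perm_firstIdx combined).symm (firstIdx_pairwise combined 0 [])

-- mapping ranked pairs with the closed-form exponent is valmap of the key list
theorem enum_valmap_pairs (ps : List (String × Int)) (s p : Int) :
    (PySem.List.enumerate ps s).map (fun rk => (rk.2.1, (2 : Int) ^ (p - rk.1).toNat))
      = valmap (ps.map Prod.fst) (p - s) := by
  induction ps generalizing s with
  | nil => simp [PySem.List.enumerate_nil, valmap]
  | cons q rest ih =>
    rw [PySem.List.enumerate_cons]
    simp only [List.map_cons, valmap]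
    refine congrArg _ ?_
    rw [ih (s + 1)]
    congr 1
    ring

-- ===== VERDICT (by name: the statement is the Claim_ definition above) =====
theorem setup_antigen_dict_py_spec : Claim_equal_setup_antigen_dict_py := by
  intro antigens antigen_order length _ _
  unfold Spec_setup_antigen_dict_py setup_antigen_dict_py setup_antigen_dict_py_alt
  rw [loop_items _ _ _ (by simp [PySem.Dict.keys_empty])]
  simp only []
  rw [sorted_items_eq_firstIdx]
  rw [show ((length - 1) : Int) = (length - 1) - 0 by ring]
  rw [enum_valmap_pairs]
  rw [map_fst_firstIdx]
  simp [PySem.Dict.empty]
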